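-- pv_equiv track=rewrite | github.com/ChangmooMoon/LeetCode | 2480-find-subarrays-with-equal-sum/2480-find-subarrays-with-equal-sum.py | findSubarrays
-- ===== SOURCE A (Python) =====
-- from typing import List
--
-- def findSubarrays(nums: List[int]) -> bool:
--     N = len(nums)
--     checker = set()
--     for i in range(N-1):
--         if nums[i]+nums[i+1] in checker:
--             return True
--         checker.add(nums[i]+nums[i+1])
--     return False
-- ===== SOURCE B (Python) =====
-- def findSubarrays(nums):
--     sums = sorted(nums[i] + nums[i + 1] for i in range(len(nums) - 1))
--     for a, b in zip(sums, sums[1:]):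
--         if a == b:
--             return True
--     return False
-- ===== Notes on version B (the rewrite author's own statement) =====
-- stated objective: alternative
-- what changed: A detects a repeated adjacent-pair sum with an incrementally grown hash set and an early return; B sorts the list of adjacent-pair sums and scans consecutive sorted entries for an equal neighbour, so duplicate detection becomes an order-based adjacency test with no set at all.
import Mathlib
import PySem

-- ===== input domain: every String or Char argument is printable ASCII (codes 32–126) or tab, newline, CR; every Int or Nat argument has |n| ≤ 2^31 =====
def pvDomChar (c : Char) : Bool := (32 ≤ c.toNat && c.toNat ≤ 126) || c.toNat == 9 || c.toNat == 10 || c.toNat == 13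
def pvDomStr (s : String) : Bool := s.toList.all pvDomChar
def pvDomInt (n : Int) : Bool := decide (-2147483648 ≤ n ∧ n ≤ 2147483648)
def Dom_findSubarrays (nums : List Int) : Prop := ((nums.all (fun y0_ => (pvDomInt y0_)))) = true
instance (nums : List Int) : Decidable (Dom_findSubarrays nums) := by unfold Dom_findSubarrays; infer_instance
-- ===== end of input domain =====

-- B sorts the adjacent-pair sums and scans consecutive sorted entries for an equal
-- neighbour, instead of A's incremental set with an early return (objective: alternative).

-- ===== PORT A =====
-- the loop 'for i in range(N-1): if s in checker: return True; checker.add(s)' with early return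
def findSubarraysGo (nums : List Int) : List Int → PySem.Set Int → Bool
  | [], _ => false
  | i :: rest, checker =>
    let s := PySem.List.pyGetD nums i 0 + PySem.List.pyGetD nums (i + 1) 0
    if PySem.Set.contains checker s then true
    else findSubarraysGo nums rest (PySem.Set.add checker s)

def findSubarrays (nums : List Int) : Bool :=
  findSubarraysGo nums (PySem.List.pyRange 0 ((nums.length : Int) - 1) 1) PySem.Set.empty

-- ===== PORT B =====
-- 'for a, b in zip(sums, sums[1:]): if a == b: return True' — scan of consecutive entries
def adjEqScan : List Int → Bool
  | a :: b :: t => if a == b then true else adjEqScan (b :: t)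
  | _ => false

def findSubarrays_alt (nums : List Int) : Bool :=
  let sums := PySem.List.sorted
    ((PySem.List.pyRange 0 ((nums.length : Int) - 1) 1).map
      (fun i => PySem.List.pyGetD nums i 0 + PySem.List.pyGetD nums (i + 1) 0))
    (fun x => x) false
  adjEqScan sums

-- ===== PRECONDITION & SPEC =====
def Spec_findSubarrays (nums : List Int) (out : Bool) : Prop := out = findSubarrays_alt nums
instance (nums : List Int) (out : Bool) : Decidable (Spec_findSubarrays nums out) := by unfold Spec_findSubarrays; infer_instance

-- ===== CLAIM (what is proved, stated in full; the proofs are below) =====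
def Claim_equal_findSubarrays : Prop := ∀ (nums : List Int), Dom_findSubarrays nums → Spec_findSubarrays nums (findSubarrays nums)

-- ===== LEMMAS AND PROOFS =====

-- A's scan-with-set returns true iff some computed sum repeats (or was already in the set)
theorem go_eq (nums : List Int) (idxs : List Int) (ch : PySem.Set Int) :
    findSubarraysGo nums idxs ch =
      !decide ((idxs.map (fun i => PySem.List.pyGetD nums i 0 + PySem.List.pyGetD nums (i + 1) 0)).Nodup ∧
        ∀ x ∈ idxs.map (fun i => PySem.List.pyGetD nums i 0 + PySem.List.pyGetD nums (i + 1) 0), x ∉ ch) := by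
  induction idxs generalizing ch with
  | nil => simp [findSubarraysGo]
  | cons i rest ih =>
    by_cases h : (PySem.List.pyGetD nums i 0 + PySem.List.pyGetD nums (i + 1) 0) ∈ ch
    · have : ¬ ((i :: rest).map (fun i => PySem.List.pyGetD nums i 0 + PySem.List.pyGetD nums (i + 1) 0)).Nodup ∨
          ¬ ∀ x ∈ (i :: rest).map (fun i => PySem.List.pyGetD nums i 0 + PySem.List.pyGetD nums (i + 1) 0), x ∉ ch :=
        Or.inr (fun hall => hall _ (by simp) h)
      simp only [findSubarraysGo]
      simp only [List.map_cons, List.mem_cons, List.mem_map] at this ⊢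
      rcases this with hthis | hthis
      · simp [hthis, h]
      · simp [h]
    · simp only [findSubarraysGo]
      rw [if_neg (by simp [h])]
      rw [ih]
      congr 1
      simp only [List.map_cons, List.nodup_cons, List.mem_cons, List.mem_map, PySem.Set.mem_add,
        decide_eq_decide]
      constructor
      · rintro ⟨hnd, hall⟩
        constructor
        · constructor
          · rintro ⟨j, hj, hje⟩
            exact (hall _ ⟨j, hj, rfl⟩) (Or.inr hje)
          · exact hnd
        · rintro x (hx' | ⟨j, hj, rfl⟩)
          · subst hx'; exact h
          · exact fun hin => (hall _ ⟨j, hj, rfl⟩) (Or.inl hin)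
      · rintro ⟨⟨hx, hnd⟩, hall⟩
        refine ⟨hnd, ?_⟩
        rintro x ⟨j, hj, rfl⟩ (hin | heq)
        · exact hall _ (Or.inr ⟨j, hj, rfl⟩) hin
        · exact hx ⟨j, hj, heq⟩

-- on a ≤-sorted list, an equal consecutive pair exists iff the list has a duplicate
theorem adjEqScan_eq_not_nodup (ss : List Int) (hp : ss.Pairwise (· ≤ ·)) :
    adjEqScan ss = !decide ss.Nodup := by
  induction ss with
  | nil => simp [adjEqScan]
  | cons a t ih =>
    cases t with
    | nil => simp [adjEqScan]
    | cons b t2 =>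
      rcases List.pairwise_cons.mp hp with ⟨hale, hp'⟩
      by_cases hab : a = b
      · subst hab
        simp [adjEqScan, List.nodup_cons]
      · have hlt : a < b := lt_of_le_of_ne (hale b (by simp)) hab
        have hnot : a ∉ b :: t2 := by
          rcases List.pairwise_cons.mp hp' with ⟨hble, -⟩
          intro hm
          rcases List.mem_cons.mp hm with rfl | hm2
          · exact hab rfl
          · exact absurd rfl (ne_of_lt (lt_of_lt_of_le hlt (hble a hm2)))
        have : adjEqScan (a :: b :: t2) = adjEqScan (b :: t2) := by
          simp [adjEqScan, hab]
        rw [this, ih hp']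
        simp [List.nodup_cons, hnot]

-- ===== VERDICT (by name: the statement is the Claim_ definition above) =====
theorem findSubarrays_spec : Claim_equal_findSubarrays := by
  intro nums _
  unfold Spec_findSubarrays findSubarrays findSubarrays_alt
  rw [go_eq]
  set sums := (PySem.List.pyRange 0 ((nums.length : Int) - 1) 1).map
    (fun i => PySem.List.pyGetD nums i 0 + PySem.List.pyGetD nums (i + 1) 0) with hs
  rw [adjEqScan_eq_not_nodup _ (by simpa using PySem.List.sorted_pairwise sums (fun x => x))]
  have hperm : (PySem.List.sorted sums (fun x => x) false).Perm sums :=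
    PySem.List.sorted_perm sums (fun x => x) false
  simp [hperm.nodup_iff, PySem.Set.empty]
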